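-- pv_equiv track=rewrite | github.com/mikitachab/youtube-caption-search | youtube_caption_search/youtube_api.py | _make_pages_results_counts
-- ===== SOURCE A (Python) =====
-- from typing import (
--     Any,
--     Dict,
--     List,
--     Iterator,
--     Optional,
--     TypedDict,
-- )
--
-- def _make_pages_results_counts(n_total: int, n_per_page: int) -> Iterator[int]:
--     """make an iterator with numbers maximum n_per_page summing to n_total
--         e.g.
--         _make_pages_results_counts(150, 50) -> [50, 50, 50]
--         _make_pages_results_counts(112, 50) -> [50, 50, 12]
--     """
--     while n_total:
--         if n_total > n_per_page:
--             yield n_per_page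
--             n_total -= n_per_page
--         else:
--             yield n_total
--             n_total = 0
-- ===== SOURCE B (Python) =====
-- def _make_pages_results_counts(n_total: int, n_per_page: int):
--     """Yield the per-page result counts: full pages of n_per_page, then the remainder."""
--     if n_total <= 0:
--         return
--     q, r = divmod(n_total, n_per_page)
--     yield from [n_per_page] * q
--     if r:
--         yield r
-- ===== Notes on version B (the rewrite author's own statement) =====
-- stated objective: simpler
-- what changed: Replaces A's repeated-subtraction while-loop with a single divmod split (q full pages plus the remainder); Pre_ restricts to the pager's natural domain (n_total >= 0, n_per_page > 0), outside which A loops forever, or accidentally yields a non-positive total as a 'page count' where B yields nothing.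
-- outside the precondition, e.g. on _make_pages_results_counts(-5, 50): A returns [-5], B returns []; on _make_pages_results_counts(-3, -1): A returns [-3], B returns []; on _make_pages_results_counts(0, 0): A returns [], B returns []
import Mathlib
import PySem

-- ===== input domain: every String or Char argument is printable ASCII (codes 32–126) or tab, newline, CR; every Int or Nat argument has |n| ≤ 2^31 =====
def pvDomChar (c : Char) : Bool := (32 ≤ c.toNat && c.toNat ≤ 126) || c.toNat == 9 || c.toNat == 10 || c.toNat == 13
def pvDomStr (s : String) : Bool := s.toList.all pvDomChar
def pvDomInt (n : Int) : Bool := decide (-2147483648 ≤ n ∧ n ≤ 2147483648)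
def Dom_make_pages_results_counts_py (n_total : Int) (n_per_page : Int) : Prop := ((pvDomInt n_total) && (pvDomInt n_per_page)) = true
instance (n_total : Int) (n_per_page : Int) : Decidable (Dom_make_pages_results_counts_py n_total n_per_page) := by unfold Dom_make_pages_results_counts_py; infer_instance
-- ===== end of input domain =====

-- B replaces A's repeated-subtraction loop by one divmod split (objective: simpler).

-- ===== PORT A =====
-- literal port of the while-loop; the inner guard `0 < n_per_page` only makes the
-- recursion total: exactly there the Python loop never terminates (outside Pre_)
def make_pages_results_counts_py (n_total : Int) (n_per_page : Int) : List Int :=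
  if _h0 : n_total = 0 then []
  else if _h1 : n_total > n_per_page then
    if _h2 : 0 < n_per_page then
      n_per_page :: make_pages_results_counts_py (n_total - n_per_page) n_per_page
    else []  -- Python diverges here; outside Pre_
  else [n_total]
termination_by n_total.toNat
decreasing_by omega

-- ===== PORT B =====
def make_pages_results_counts_py_alt (n_total : Int) (n_per_page : Int) : List Int :=
  if n_total ≤ 0 then []
  else
    let q := PySem.Int.floordiv n_total n_per_page
    let r := PySem.Int.mod n_total n_per_page
    List.replicate q.toNat n_per_page ++ (if r ≠ 0 then [r] else [])

-- ===== PRECONDITION & SPEC =====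
-- Pre_ restricts to the pager's natural domain (a non-negative result total and a
-- positive page size): outside it A either loops forever (n_per_page ≤ 0 < n_total),
-- or accidentally yields a non-positive total as a single 'page count' where B's
-- natural algorithm yields nothing.
def Pre_make_pages_results_counts_py (n_total : Int) (n_per_page : Int) : Prop :=
  0 ≤ n_total ∧ 0 < n_per_page
instance (n_total : Int) (n_per_page : Int) : Decidable (Pre_make_pages_results_counts_py n_total n_per_page) := by unfold Pre_make_pages_results_counts_py; infer_instance

def pvWitness_make_pages_results_counts_py : Int × Int := (112, 50)

def Spec_make_pages_results_counts_py (n_total : Int) (n_per_page : Int) (out : List Int) : Prop := out = make_pages_results_counts_py_alt n_total n_per_page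
instance (n_total : Int) (n_per_page : Int) (out : List Int) : Decidable (Spec_make_pages_results_counts_py n_total n_per_page out) := by unfold Spec_make_pages_results_counts_py; infer_instance

-- ===== CLAIM (what is proved, stated in full; the proofs are below) =====
def Claim_equal_make_pages_results_counts_py : Prop := ∀ (n_total : Int) (n_per_page : Int), Dom_make_pages_results_counts_py n_total n_per_page → Pre_make_pages_results_counts_py n_total n_per_page → Spec_make_pages_results_counts_py n_total n_per_page (make_pages_results_counts_py n_total n_per_page)

-- ===== LEMMAS AND PROOFS =====

-- the positive case: A's loop equals the divmod split
theorem pages_pos (k : Nat) : ∀ (n p : Int), n.toNat ≤ k → 0 < n → 0 < p →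
    make_pages_results_counts_py n p =
      List.replicate (PySem.Int.floordiv n p).toNat p ++
        (if PySem.Int.mod n p ≠ 0 then [PySem.Int.mod n p] else []) := by
  induction k with
  | zero => intro n p hk hn hp; omega
  | succ k ih =>
    intro n p hk hn hp
    by_cases hgt : n > p
    · have hrec := ih (n - p) p (by omega) (by omega) hp
      have hdm := PySem.Int.floordiv_mul_add_mod (n - p) p
      have hr0 : 0 ≤ PySem.Int.mod (n - p) p := PySem.Int.mod_nonneg _ hp
      have hr1 : PySem.Int.mod (n - p) p < p := PySem.Int.mod_lt _ hp
      set q' := PySem.Int.floordiv (n - p) p with hq'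
      set r' := PySem.Int.mod (n - p) p with hr'
      have hq : PySem.Int.floordiv n p = q' + 1 := by
        rw [PySem.Int.floordiv_eq_iff_of_pos hp]
        constructor
        · nlinarith
        · nlinarith
      have hm : PySem.Int.mod n p = r' := by
        have hdm2 := PySem.Int.floordiv_mul_add_mod n p
        rw [hq] at hdm2
        nlinarith [hdm2, hdm]
      have hq'nonneg : 0 ≤ q' := by nlinarith
      have htn : (q' + 1).toNat = q'.toNat + 1 := by omega
      rw [make_pages_results_counts_py]
      simp only [dif_neg (by omega : ¬ n = 0), dif_pos hgt, dif_pos hp]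
      rw [hrec, hq, hm, htn]
      simp [List.replicate_succ]
    · rw [make_pages_results_counts_py]
      simp only [dif_neg (by omega : ¬ n = 0), dif_neg hgt]
      by_cases heq : n = p
      · have hq : PySem.Int.floordiv n p = 1 := by
          rw [PySem.Int.floordiv_eq_iff_of_pos hp]
          constructor <;> · ring_nf; omega
        have hm : PySem.Int.mod n p = 0 := by
          have := PySem.Int.floordiv_mul_add_mod n p
          rw [hq] at this; omega
        rw [hq, hm]; simp [heq]
      · have hq : PySem.Int.floordiv n p = 0 := by
          rw [PySem.Int.floordiv_eq_iff_of_pos hp]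
          constructor <;> · ring_nf; omega
        have hm : PySem.Int.mod n p = n := by
          have := PySem.Int.floordiv_mul_add_mod n p
          rw [hq] at this; omega
        have hne : n ≠ 0 := by omega
        rw [hq, hm]; simp [hne]

-- ===== VERDICT (by name: the statement is the Claim_ definition above) =====
theorem make_pages_results_counts_py_spec : Claim_equal_make_pages_results_counts_py := by
  intro n p _hdom hpre
  obtain ⟨hn, hp⟩ := hpre
  unfold Spec_make_pages_results_counts_py
  by_cases hn0 : n = 0
  · subst hn0
    rw [make_pages_results_counts_py]
    simp [make_pages_results_counts_py_alt]
  · have hpos : 0 < n := by omega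
    rw [pages_pos n.toNat n p (le_refl _) hpos hp]
    unfold make_pages_results_counts_py_alt
    simp only [if_neg (by omega : ¬ n ≤ 0)]
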